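-- pv_equiv track=rewrite | github.com/bartandrews/infinite_cylinder | scripts/configurations.py | min_diff
-- ===== SOURCE A (Python) =====
-- def min_diff(list_val):  # returns minimum difference between any pair
--     n = len(list_val)  # length of the list
--     list_val = sorted(list_val)  # sort array in non-decreasing order
--     diff = 10 ** 20  # initialize difference as infinite
--     for i in range(n - 1):  # find the min diff by comparing adjacent pairs in sorted array
--         if list_val[i + 1] - list_val[i] < diff:
--             diff = list_val[i + 1] - list_val[i]
--     return diff
-- ===== SOURCE B (Python) =====
-- def min_diff(list_val):  # brute force over all pairs, no sorting; same 10**20 sentinel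
--     n = len(list_val)
--     diff = 10 ** 20
--     for i in range(n):
--         for j in range(i + 1, n):
--             d = abs(list_val[i] - list_val[j])
--             if d < diff:
--                 diff = d
--     return diff
-- ===== Notes on version B (the rewrite author's own statement) =====
-- stated objective: alternative
-- what changed: B drops the sort entirely and computes the minimum absolute difference by a brute-force scan over all unordered pairs, keeping the same 10**20 sentinel; A sorts and scans adjacent pairs.
import Mathlib
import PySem

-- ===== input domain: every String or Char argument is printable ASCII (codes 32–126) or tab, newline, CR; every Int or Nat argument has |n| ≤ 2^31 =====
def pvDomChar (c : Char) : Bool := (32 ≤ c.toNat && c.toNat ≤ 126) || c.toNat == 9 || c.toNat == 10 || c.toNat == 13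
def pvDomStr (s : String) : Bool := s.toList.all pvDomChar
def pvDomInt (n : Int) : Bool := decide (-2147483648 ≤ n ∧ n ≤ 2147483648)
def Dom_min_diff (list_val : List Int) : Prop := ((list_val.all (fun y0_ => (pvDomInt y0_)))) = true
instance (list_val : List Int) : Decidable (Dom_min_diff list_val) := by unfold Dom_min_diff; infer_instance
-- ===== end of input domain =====

-- B replaces A's sort-then-adjacent-scan by a brute-force scan over all unordered pairs
-- (same 10**20 sentinel); objective: alternative algorithm, same results, no speed claim.


-- ===== PORT A =====
-- literal port of A: n = len, sort, then for i in range(n-1) compare adjacent pairs.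
-- indices i and i+1 are always in range (i < n-1), so pyGetD is exact here.
def min_diff (list_val : List Int) : Int :=
  (PySem.List.pyRange 0 ((list_val.length : Int) - 1) 1).foldl
    (fun diff i =>
      if PySem.List.pyGetD (PySem.List.sorted list_val (fun x => x) false) (i + 1) 0
           - PySem.List.pyGetD (PySem.List.sorted list_val (fun x => x) false) i 0 < diff then
        PySem.List.pyGetD (PySem.List.sorted list_val (fun x => x) false) (i + 1) 0
          - PySem.List.pyGetD (PySem.List.sorted list_val (fun x => x) false) i 0
      else diff)
    (10 ^ 20)

-- ===== PORT B =====
-- literal port of Source B: nested loops over all pairs i < j, min of |xs[i] - xs[j]|.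
-- indices i and j are always in range, so pyGetD is exact here.
def min_diff_alt (list_val : List Int) : Int :=
  (PySem.List.pyRange 0 (list_val.length : Int) 1).foldl
    (fun diff i =>
      (PySem.List.pyRange (i + 1) (list_val.length : Int) 1).foldl
        (fun diff j =>
          if |PySem.List.pyGetD list_val i 0 - PySem.List.pyGetD list_val j 0| < diff then
            |PySem.List.pyGetD list_val i 0 - PySem.List.pyGetD list_val j 0|
          else diff)
        diff)
    (10 ^ 20)

-- ===== PRECONDITION & SPEC =====
def Spec_min_diff (list_val : List Int) (out : Int) : Prop := out = min_diff_alt list_val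
instance (list_val : List Int) (out : Int) : Decidable (Spec_min_diff list_val out) := by unfold Spec_min_diff; infer_instance

-- ===== CLAIM (what is proved, stated in full; the proofs are below) =====
def Claim_equal_min_diff : Prop := ∀ (list_val : List Int), Dom_min_diff list_val → Spec_min_diff list_val (min_diff list_val)

-- ===== LEMMAS AND PROOFS =====

-- the inner loop of B for a fixed element x: running min of |x - y| over y ∈ t
def minAbsFold (x : Int) (t : List Int) (acc : Int) : Int :=
  t.foldl (fun a y => min a |x - y|) acc

-- B's algorithm, de-indexed: process the list head-first, pairing the head with the tail
def pairFold : List Int → Int → Int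
  | [], acc => acc
  | x :: t, acc => pairFold t (minAbsFold x t acc)

-- A's loop, de-indexed: running min of adjacent differences
def adjFold : List Int → Int → Int
  | a :: b :: t, acc => adjFold (b :: t) (min acc (b - a))
  | _, acc => acc

theorem if_lt_eq_min (c v : Int) : (if v < c then v else c) = min c v := by
  split_ifs with h
  · exact (min_eq_right h.le).symm
  · exact (min_eq_left (not_lt.mp h)).symm

-- A's indexed loop equals adjFold
theorem range_foldl_adj (s : List Int) (acc : Int) :
    (List.range (s.length - 1)).foldl
      (fun diff k => min diff (s.getD (k + 1) 0 - s.getD k 0)) acc = adjFold s acc := by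
  induction s generalizing acc with
  | nil => simp [adjFold]
  | cons a t ih =>
    cases t with
    | nil => simp [adjFold]
    | cons b t' =>
      have h : (a :: b :: t').length - 1 = t'.length + 1 := by simp
      rw [h, List.range_succ_eq_map]
      simp only [List.foldl_cons, List.foldl_map, List.getD_cons_succ, List.getD_cons_zero,
        Nat.succ_eq_add_one, adjFold]
      exact ih (min acc (b - a))

-- B's indexed loops equal pairFold
theorem range_foldl_pair (xs : List Int) (acc : Int) :
    (List.range xs.length).foldl
      (fun diff k => ((xs.drop (k + 1)).foldl (fun a y => min a |xs.getD k 0 - y|) diff)) acc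
      = pairFold xs acc := by
  induction xs generalizing acc with
  | nil => simp [pairFold]
  | cons x t ih =>
    rw [List.length_cons, List.range_succ_eq_map]
    simp only [List.foldl_cons, List.foldl_map, List.getD_cons_succ, List.getD_cons_zero,
      Nat.succ_eq_add_one, List.drop_succ_cons]
    rw [List.drop_zero, ih]
    rfl

theorem minAbsFold_min (x : Int) (t : List Int) (c v : Int) :
    minAbsFold x t (min c v) = min (minAbsFold x t c) v := by
  induction t generalizing c with
  | nil => rfl
  | cons z t ih =>
    simp only [minAbsFold, List.foldl_cons] at *
    rw [min_right_comm c v |x - z|, ih]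

theorem minAbsFold_fix (x : Int) (t : List Int) (c : Int) (h : ∀ y ∈ t, c ≤ |x - y|) :
    minAbsFold x t c = c := by
  induction t with
  | nil => rfl
  | cons z t ih =>
    simp only [minAbsFold, List.foldl_cons]
    rw [min_eq_left (h z (by simp))]
    exact ih (fun y hy => h y (by simp [hy]))

theorem minAbsFold_comm (x y : Int) (l : List Int) (c : Int) :
    minAbsFold x l (minAbsFold y l c) = minAbsFold y l (minAbsFold x l c) := by
  induction l generalizing c with
  | nil => rfl
  | cons z t ih =>
    have hx : minAbsFold x (z :: t) = fun c => minAbsFold x t (min c |x - z|) := rfl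
    have hy : minAbsFold y (z :: t) = fun c => minAbsFold y t (min c |y - z|) := rfl
    rw [hx, hy]
    simp only [minAbsFold_min]
    rw [ih, min_right_comm]

theorem minAbsFold_perm (x : Int) {t₁ t₂ : List Int} (h : t₁.Perm t₂) (c : Int) :
    minAbsFold x t₁ c = minAbsFold x t₂ c := by
  haveI : RightCommutative (fun (a y : Int) => min a |x - y|) :=
    ⟨fun b a₁ a₂ => min_right_comm b |x - a₁| |x - a₂|⟩
  exact h.foldl_eq c

theorem pairFold_perm {l₁ l₂ : List Int} (h : l₁.Perm l₂) (acc : Int) :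
    pairFold l₁ acc = pairFold l₂ acc := by
  induction h generalizing acc with
  | nil => rfl
  | cons x h ih =>
    simp only [pairFold]
    rw [minAbsFold_perm x h, ih]
  | swap x y l =>
    simp only [pairFold, minAbsFold, List.foldl_cons]
    rw [show |x - y| = |y - x| from abs_sub_comm x y]
    change pairFold l (minAbsFold x l (minAbsFold y l (min acc |y - x|))) =
      pairFold l (minAbsFold y l (minAbsFold x l (min acc |y - x|)))
    rw [minAbsFold_comm]
  | trans h₁ h₂ ih₁ ih₂ => rw [ih₁, ih₂]

theorem pairFold_sorted (s : List Int) (hs : s.Pairwise (· ≤ ·)) (acc : Int) :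
    pairFold s acc = adjFold s acc := by
  induction s generalizing acc with
  | nil => rfl
  | cons x t ih =>
    rcases List.pairwise_cons.mp hs with ⟨hx, ht⟩
    cases t with
    | nil => rfl
    | cons b t' =>
      have hxb : x ≤ b := hx b (by simp)
      have habs : |x - b| = b - x := by
        rw [abs_sub_comm]; exact abs_of_nonneg (by omega)
      simp only [pairFold, minAbsFold, List.foldl_cons, habs]
      have hfix : minAbsFold x t' (min acc (b - x)) = min acc (b - x) := by
        apply minAbsFold_fix
        intro y hy
        have h1 : b ≤ y := (List.pairwise_cons.mp ht).1 y hy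
        have h2 : x ≤ y := hx y (by simp [hy])
        have : |x - y| = y - x := by rw [abs_sub_comm]; exact abs_of_nonneg (by omega)
        rw [this]
        calc min acc (b - x) ≤ b - x := min_le_right _ _
          _ ≤ y - x := by omega
      show pairFold (b :: t') (minAbsFold x t' (min acc (b - x))) = adjFold (x :: b :: t') acc
      rw [hfix]
      exact ih ht (min acc (b - x))

-- port A computes adjFold of the sorted list
theorem min_diff_eq_adjFold (xs : List Int) :
    min_diff xs = adjFold (PySem.List.sorted xs (fun x => x) false) (10 ^ 20) := by
  unfold min_diff
  set s := PySem.List.sorted xs (fun x => x) false with hsdef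
  have hlen : s.length = xs.length := PySem.List.length_sorted xs _ _
  rw [← range_foldl_adj s (10 ^ 20)]
  rw [PySem.List.pyRange_one 0 ((xs.length : Int) - 1)]
  simp only [sub_zero, List.foldl_map, zero_add]
  have hcast : ((xs.length : Int) - 1).toNat = s.length - 1 := by
    rw [hlen]
    exact_mod_cast Int.toNat_sub xs.length 1
  rw [hcast]
  apply PySem.List.foldl_congr_mem
  intro acc k _
  have h1 : PySem.List.pyGetD s ((k : Int) + 1) 0 = s.getD (k + 1) 0 := by
    rw [show ((k : Int) + 1) = ((k + 1 : Nat) : Int) by push_cast; ring]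
    exact PySem.List.pyGetD_natCast s (k + 1) 0
  rw [h1, PySem.List.pyGetD_natCast, if_lt_eq_min]

-- port B computes pairFold of the list
theorem min_diff_alt_eq_pairFold (xs : List Int) :
    min_diff_alt xs = pairFold xs (10 ^ 20) := by
  unfold min_diff_alt
  rw [← range_foldl_pair xs (10 ^ 20)]
  rw [PySem.List.pyRange_zero_nat xs.length]
  simp only [List.foldl_map]
  apply PySem.List.foldl_congr_mem
  intro acc k _
  have hinner :
      (PySem.List.pyRange ((k : Int) + 1) (xs.length : Int) 1).foldl
        (fun diff j =>
          if |PySem.List.pyGetD xs (k : Int) 0 - PySem.List.pyGetD xs j 0| < diff then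
            |PySem.List.pyGetD xs (k : Int) 0 - PySem.List.pyGetD xs j 0|
          else diff) acc
      = (xs.drop ((k : Int) + 1).toNat).foldl
          (fun a y => if |PySem.List.pyGetD xs (k : Int) 0 - y| < a then
            |PySem.List.pyGetD xs (k : Int) 0 - y| else a) acc :=
    PySem.List.foldl_pyRange_pyGetD' xs 0
      (fun a y => if |PySem.List.pyGetD xs (k : Int) 0 - y| < a then
        |PySem.List.pyGetD xs (k : Int) 0 - y| else a) acc (by positivity)
  rw [hinner]
  have hk : ((k : Int) + 1).toNat = k + 1 := by omega
  rw [hk, PySem.List.pyGetD_natCast]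
  apply PySem.List.foldl_congr_mem
  intro a y _
  rw [if_lt_eq_min]

-- ===== VERDICT (by name: the statement is the Claim_ definition above) =====
theorem min_diff_spec : Claim_equal_min_diff := by
  intro xs _
  unfold Spec_min_diff
  rw [min_diff_eq_adjFold, min_diff_alt_eq_pairFold]
  rw [← pairFold_sorted _ (PySem.List.sorted_pairwise xs (fun x => x)) (10 ^ 20)]
  exact pairFold_perm (PySem.List.sorted_perm xs (fun x => x) false) (10 ^ 20)
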